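-- pv_equiv track=rewrite | github.com/mikeparcewski/wicked-garden | scripts/engineering/patch/generators/kotlin_generator.py | _find_property_insertion_point
-- ===== SOURCE A (Python) =====
-- from typing import Any, Dict, List, Optional, Set
--
-- def _find_property_insertion_point(
--
--     lines: List[str],
--     class_start: int,
--     class_end: int
-- ) -> int:
--     """Find the line after which to insert a new property."""
--     last_property = class_start + 1
--
--     for i in range(class_start + 1, class_end):
--         line = lines[i].strip()
--         if line.startswith("val ") or line.startswith("var ") or \
--            line.startswith("private val") or line.startswith("private var"):
--             last_property = i
--         elif line.startswith("fun ") or line.startswith("override fun"):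
--             break
--
--     return last_property
-- ===== SOURCE B (Python) =====
-- def _find_property_insertion_point(lines, class_start, class_end):
--     """Find the line after which to insert a new property."""
--     break_index = class_end
--     for i in range(class_start + 1, class_end):
--         s = lines[i].strip()
--         if s.startswith("fun ") or s.startswith("override fun"):
--             break_index = i
--             break
--     for i in reversed(range(class_start + 1, break_index)):
--         s = lines[i].strip()
--         if s.startswith("val ") or s.startswith("var ") or \
--            s.startswith("private val") or s.startswith("private var"):
--             return i
--     return class_start + 1
-- ===== Notes on version B (the rewrite author's own statement) =====
-- stated objective: alternative
-- what changed: Replaces A's single pass with last-property bookkeeping by two distinct phases: a forward scan that only finds the break index (first 'fun '/'override fun' line, default class_end), then a backward scan from there for the nearest property line, defaulting to class_start+1.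
import Mathlib
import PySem

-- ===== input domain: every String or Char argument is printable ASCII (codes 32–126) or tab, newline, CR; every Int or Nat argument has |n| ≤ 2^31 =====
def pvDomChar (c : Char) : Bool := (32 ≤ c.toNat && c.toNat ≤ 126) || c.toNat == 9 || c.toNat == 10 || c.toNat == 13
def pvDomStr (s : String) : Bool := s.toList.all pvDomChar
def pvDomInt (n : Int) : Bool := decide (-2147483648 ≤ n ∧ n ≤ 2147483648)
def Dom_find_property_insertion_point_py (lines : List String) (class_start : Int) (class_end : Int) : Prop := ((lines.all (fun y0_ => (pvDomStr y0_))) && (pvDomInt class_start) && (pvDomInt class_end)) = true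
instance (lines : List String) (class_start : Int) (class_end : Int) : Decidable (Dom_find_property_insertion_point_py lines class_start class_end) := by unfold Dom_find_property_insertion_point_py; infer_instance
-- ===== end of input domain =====

-- B replaces A's single bookkeeping pass by a forward break-finding pass plus a backward
-- search for the nearest property line (objective: alternative decomposition, same cost).

-- ===== PORT A =====
-- stripped-line classifiers shared by both ports (they are A's/B's literal tests)
def pvIsProp (s : String) : Bool :=
  let line := PySem.Str.strip s
  PySem.Str.startswith line "val " || PySem.Str.startswith line "var " ||
  PySem.Str.startswith line "private val" || PySem.Str.startswith line "private var"

def pvIsFun (s : String) : Bool :=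
  let line := PySem.Str.strip s
  PySem.Str.startswith line "fun " || PySem.Str.startswith line "override fun"

-- A's `for i in range(..)` loop as the obvious recursion on the (lazy) index, like
-- Python's lazy range with break; `none` = IndexError (excluded by Pre_)
def pvLoopA (lines : List String) (i stop : Int) (last : Int) : Option Int :=
  if i < stop then
    match PySem.List.pyGet? lines i with
    | none => none
    | some s =>
      if pvIsProp s then pvLoopA lines (i + 1) stop i
      else if pvIsFun s then some last
      else pvLoopA lines (i + 1) stop last
  else some last
termination_by (stop - i).toNat
decreasing_by all_goals simp_wf; omega

def find_property_insertion_point_py (lines : List String) (class_start : Int) (class_end : Int) : Int :=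
  (pvLoopA lines (class_start + 1) class_end (class_start + 1)).getD 0

-- ===== PORT B =====
-- forward pass on the lazy index: first i whose stripped line starts a function;
-- default = class_end; `none` = IndexError (excluded by Pre_)
def pvFindBreak (lines : List String) (i stop : Int) (dflt : Int) : Option Int :=
  if i < stop then
    match PySem.List.pyGet? lines i with
    | none => none
    | some s => if pvIsFun s then some i else pvFindBreak lines (i + 1) stop dflt
  else some dflt
termination_by (stop - i).toNat
decreasing_by all_goals simp_wf; omega

-- backward pass over reversed(range(class_start+1, break_index)): first property index,
-- else the fallback.  (pyGet? cannot fail here under Pre_; the `none` branch is unreachable there.)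
def pvBackScan (lines : List String) (idxs : List Int) (fallback : Int) : Int :=
  match idxs with
  | [] => fallback
  | i :: rest =>
    match PySem.List.pyGet? lines i with
    | none => fallback
    | some s => if pvIsProp s then i else pvBackScan lines rest fallback

def find_property_insertion_point_py_alt (lines : List String) (class_start : Int) (class_end : Int) : Int :=
  match pvFindBreak lines (class_start + 1) class_end class_end with
  | none => 0
  | some bi => pvBackScan lines (PySem.List.pyRange (class_start + 1) bi 1).reverse (class_start + 1)

-- ===== PRECONDITION & SPEC =====
-- Pre_ is EXACTLY the set of inputs on which the Python A returns (and B returns the same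
-- value); outside it both A and B raise IndexError: the scan window reaches an out-of-range
-- index (start below -len, or end beyond len) before any 'fun '/'override fun' line breaks
-- the loop.  Nothing on which A returns a value is excluded.
def Pre_find_property_insertion_point_py (lines : List String) (class_start : Int) (class_end : Int) : Prop :=
  class_end ≤ class_start + 1 ∨
    (-(lines.length : Int) ≤ class_start + 1 ∧
      (class_end ≤ (lines.length : Int) ∨
        (PySem.List.pyRange (class_start + 1) (lines.length : Int) 1).any
          (fun i => (PySem.List.pyGet? lines i).any pvIsFun) = true))
instance (lines : List String) (class_start : Int) (class_end : Int) : Decidable (Pre_find_property_insertion_point_py lines class_start class_end) := by unfold Pre_find_property_insertion_point_py; infer_instance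

def pvWitness_find_property_insertion_point_py : List String × Int × Int :=
  (["class Foo {", "  val x = 1", "  fun f()"], 0, 3)

def Spec_find_property_insertion_point_py (lines : List String) (class_start : Int) (class_end : Int) (out : Int) : Prop := out = find_property_insertion_point_py_alt lines class_start class_end
instance (lines : List String) (class_start : Int) (class_end : Int) (out : Int) : Decidable (Spec_find_property_insertion_point_py lines class_start class_end out) := by unfold Spec_find_property_insertion_point_py; infer_instance

-- ===== CLAIM (what is proved, stated in full; the proofs are below) =====
def Claim_equal_find_property_insertion_point_py : Prop := ∀ (lines : List String) (class_start : Int) (class_end : Int), Dom_find_property_insertion_point_py lines class_start class_end → Pre_find_property_insertion_point_py lines class_start class_end → Spec_find_property_insertion_point_py lines class_start class_end (find_property_insertion_point_py lines class_start class_end)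

-- ===== LEMMAS AND PROOFS =====

-- A line cannot be both a property line and a function line.
theorem pvProp_not_fun (s : String) : pvIsProp s = true → pvIsFun s = false := by
  unfold pvIsProp pvIsFun
  cases h : (PySem.Str.strip s).toList with
  | nil => simp [PySem.Str.startswith, h, PySem.Chars.startswith]
  | cons c cs =>
    intro hp
    simp [PySem.Str.startswith, h, PySem.Chars.startswith, List.isPrefixOf] at hp ⊢
    rcases hp with ((⟨hc, -⟩ | ⟨hc, -⟩) | ⟨hc, -⟩) | ⟨hc, -⟩ <;> subst hc <;> simp

-- Main invariant: A's loop from index a, carrying `last = backscan of what was already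
-- scanned`, equals B's break-then-backscan over the remaining range.
theorem pvMain (lines : List String) (cs ce : Int) (a : Int) (ha : cs + 1 ≤ a)
    (hb : (a = cs + 1 ∧ ce ≤ cs + 1) ∨ a ≤ ce) :
    pvLoopA lines a ce
        (pvBackScan lines (PySem.List.pyRange (cs + 1) a 1).reverse (cs + 1)) =
      match pvFindBreak lines a ce ce with
      | none => none
      | some bi =>
          some (pvBackScan lines (PySem.List.pyRange (cs + 1) bi 1).reverse (cs + 1)) := by
  by_cases hlt : a < ce
  · rw [pvLoopA, pvFindBreak]
    simp only [hlt, if_true]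
    cases hg : PySem.List.pyGet? lines a with
    | none => simp
    | some s =>
      simp only
      by_cases hf : pvIsFun s = true
      · have hp : pvIsProp s = false := by
          cases hps : pvIsProp s with
          | false => rfl
          | true => exact absurd hf (by simp [pvProp_not_fun s hps])
        simp [hp, hf]
      · have step : (PySem.List.pyRange (cs + 1) (a + 1) 1).reverse
            = a :: (PySem.List.pyRange (cs + 1) a 1).reverse := by
          rw [PySem.List.pyRange_one_succ_right ha]; simp
        by_cases hp : pvIsProp s = true
        · have heq : pvBackScan lines (PySem.List.pyRange (cs + 1) (a + 1) 1).reverse (cs + 1) = a := by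
            rw [step]; simp [pvBackScan, hg, hp]
          have ih := pvMain lines cs ce (a + 1) (by omega) (by omega)
          rw [heq] at ih
          simp only [hp, if_true, hf]
          exact ih
        · have heq : pvBackScan lines (PySem.List.pyRange (cs + 1) (a + 1) 1).reverse (cs + 1)
              = pvBackScan lines (PySem.List.pyRange (cs + 1) a 1).reverse (cs + 1) := by
            rw [step]; simp [pvBackScan, hg, hp]
          have ih := pvMain lines cs ce (a + 1) (by omega) (by omega)
          rw [heq] at ih
          simp only [hp, hf]
          exact ih
  · rw [pvLoopA, pvFindBreak]
    simp only [hlt, if_false]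
    rcases hb with ⟨hb1, hb2⟩ | hb
    · rw [hb1, PySem.List.pyRange_one_eq_nil (le_refl (cs + 1)),
        PySem.List.pyRange_one_eq_nil (by omega)]
    · have : a = ce := by omega
      rw [this]
termination_by (ce - a).toNat
decreasing_by all_goals omega

-- ===== VERDICT (by name: the statement is the Claim_ definition above) =====
theorem find_property_insertion_point_py_spec : Claim_equal_find_property_insertion_point_py := by
  intro lines cs ce _ _
  unfold Spec_find_property_insertion_point_py
  unfold find_property_insertion_point_py find_property_insertion_point_py_alt
  have h := pvMain lines cs ce (cs + 1) le_rfl (by omega)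
  rw [PySem.List.pyRange_one_eq_nil (le_refl (cs + 1))] at h
  simp only [List.reverse_nil, pvBackScan] at h
  rw [h]
  cases pvFindBreak lines (cs + 1) ce ce <;> simp
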